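-- pv_equiv track=rewrite | github.com/uds-se/fuzzingbook | notebooks/shared/utils/post_html.py | bibtex_unescape
-- ===== SOURCE A (Python) =====
-- def bibtex_unescape(contents):
--     """Fix TeX escapes introduced by BibTeX"""
--     tex_unescape_table = {
--         r'{\"a}': "ä",
--         r'{\"o}': "ö",
--         r'{\"u}': "ü",
--         r'{\"i}': "ï",
--         r'{\"e}': "ë",
--         r'{\"A}': "Ä",
--         r'{\"O}': "Ö",
--         r'{\"U}': "Ü",
--         r'{\ss}': "ß",
--         r'{\`e}': "è",
--         r'{\'e}': "é",
--         r'{\`a}': "à",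
--         r'{\'a}': "á",
--         r'{\`i}': "ì",
--         r'{\'i}': "í",
--         r'{\`o}': "ò",
--         r'{\'o}': "ó",
--         r'{\`u}': "ù",
--         r'{\'u}': "ú",
--         r'{\d{s}}': "ṣ",
--         r'{\d{n}}': "ṇ",
--         r'{\d{t}}': "ṭ",
--         r'{\=a}': "ā",
--         r'{\=i}': "ī"
--     }
--     for key in tex_unescape_table:
--         contents = contents.replace(key, tex_unescape_table[key])
--     return contents
-- ===== SOURCE B (Python) =====
-- def _umlaut(c):
--     if c == 'a': return 'ä'
--     if c == 'o': return 'ö'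
--     if c == 'u': return 'ü'
--     if c == 'i': return 'ï'
--     if c == 'e': return 'ë'
--     if c == 'A': return 'Ä'
--     if c == 'O': return 'Ö'
--     if c == 'U': return 'Ü'
--     return None
--
--
-- def _grave(c):
--     if c == 'e': return 'è'
--     if c == 'a': return 'à'
--     if c == 'i': return 'ì'
--     if c == 'o': return 'ò'
--     if c == 'u': return 'ù'
--     return None
--
--
-- def _acute(c):
--     if c == 'e': return 'é'
--     if c == 'a': return 'á'
--     if c == 'i': return 'í'
--     if c == 'o': return 'ó'
--     if c == 'u': return 'ú'
--     return None
--
--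
-- def _macron(c):
--     if c == 'a': return 'ā'
--     if c == 'i': return 'ī'
--     return None
--
--
-- def _underdot(c):
--     if c == 's': return 'ṣ'
--     if c == 'n': return 'ṇ'
--     if c == 't': return 'ṭ'
--     return None
--
--
-- def _esc(s, i):
--     """Match one escape body right after '{\\' at position i; return (replacement, total key length) or None."""
--     c = s[i:i+1]
--     if c == '"' and s[i+2:i+3] == '}':
--         u = _umlaut(s[i+1:i+2])
--         return (u, 5) if u is not None else None
--     if c == '`' and s[i+2:i+3] == '}':
--         u = _grave(s[i+1:i+2])
--         return (u, 5) if u is not None else None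
--     if c == "'" and s[i+2:i+3] == '}':
--         u = _acute(s[i+1:i+2])
--         return (u, 5) if u is not None else None
--     if c == '=' and s[i+2:i+3] == '}':
--         u = _macron(s[i+1:i+2])
--         return (u, 5) if u is not None else None
--     if s[i:i+3] == 'ss}':
--         return ('ß', 5)
--     if c == 'd' and s[i+1:i+2] == '{' and s[i+3:i+5] == '}}':
--         u = _underdot(s[i+2:i+3])
--         return (u, 7) if u is not None else None
--     return None
--
--
-- def _match(s, i):
--     if s[i:i+2] != '{\\':
--         return None
--     return _esc(s, i + 2)
--
--
-- def bibtex_unescape(contents):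
--     """Fix TeX escapes introduced by BibTeX"""
--     out = []
--     i = 0
--     n = len(contents)
--     while i < n:
--         m = _match(contents, i)
--         if m is not None:
--             rep, ln = m
--             out.append(rep)
--             i += ln
--         else:
--             out.append(contents[i])
--             i += 1
--     return ''.join(out)
-- ===== Notes on version B (the rewrite author's own statement) =====
-- stated objective: alternative
-- what changed: A's 24 sequential full-string .replace passes over a dict are replaced by a single left-to-right scan with a hand-rolled character-dispatch matcher (accent helper functions, no table) that emits each escape's replacement in one pass.
import Mathlib
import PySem

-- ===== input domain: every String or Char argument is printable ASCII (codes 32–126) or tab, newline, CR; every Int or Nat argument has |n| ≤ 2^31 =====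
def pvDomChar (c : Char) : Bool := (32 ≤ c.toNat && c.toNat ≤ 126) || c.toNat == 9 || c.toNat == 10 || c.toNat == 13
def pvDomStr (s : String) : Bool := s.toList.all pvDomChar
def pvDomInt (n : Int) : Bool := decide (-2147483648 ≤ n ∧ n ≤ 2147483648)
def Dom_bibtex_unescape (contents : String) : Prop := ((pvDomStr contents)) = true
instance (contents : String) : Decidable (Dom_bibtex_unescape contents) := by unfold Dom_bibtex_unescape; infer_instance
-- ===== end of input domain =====

-- B replaces A's 24 sequential full-string .replace passes by one left-to-right scan that
-- recognises each escape with a hand-rolled accent dispatch (no table); equivalence is proved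
-- on the ASCII domain, on which it is exact.

-- ===== PORT A =====
-- A's dict (insertion order) as an association list; A folds `str.replace` over it.
def texTable : List (String × String) :=
  [("{\\\"a}", "ä"), ("{\\\"o}", "ö"), ("{\\\"u}", "ü"), ("{\\\"i}", "ï"),
   ("{\\\"e}", "ë"), ("{\\\"A}", "Ä"), ("{\\\"O}", "Ö"), ("{\\\"U}", "Ü"),
   ("{\\ss}", "ß"), ("{\\`e}", "è"), ("{\\'e}", "é"), ("{\\`a}", "à"),
   ("{\\'a}", "á"), ("{\\`i}", "ì"), ("{\\'i}", "í"), ("{\\`o}", "ò"),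
   ("{\\'o}", "ó"), ("{\\`u}", "ù"), ("{\\'u}", "ú"), ("{\\d{s}}", "ṣ"),
   ("{\\d{n}}", "ṇ"), ("{\\d{t}}", "ṭ"), ("{\\=a}", "ā"), ("{\\=i}", "ī")]

def bibtex_unescape (contents : String) : String :=
  texTable.foldl (fun c kv => PySem.Str.replace c kv.1 kv.2) contents

-- ===== PORT B =====
-- Source B's accent dispatchers (_umlaut/_grave/_acute/_macron/_underdot), as if-chains on one char.
def umlautB (c : Char) : Option Char :=
  if c = 'a' then some 'ä' else if c = 'o' then some 'ö' else if c = 'u' then some 'ü'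
  else if c = 'i' then some 'ï' else if c = 'e' then some 'ë' else if c = 'A' then some 'Ä'
  else if c = 'O' then some 'Ö' else if c = 'U' then some 'Ü' else none

def graveB (c : Char) : Option Char :=
  if c = 'e' then some 'è' else if c = 'a' then some 'à' else if c = 'i' then some 'ì'
  else if c = 'o' then some 'ò' else if c = 'u' then some 'ù' else none

def acuteB (c : Char) : Option Char :=
  if c = 'e' then some 'é' else if c = 'a' then some 'á' else if c = 'i' then some 'í'
  else if c = 'o' then some 'ó' else if c = 'u' then some 'ú' else none

def macronB (c : Char) : Option Char :=
  if c = 'a' then some 'ā' else if c = 'i' then some 'ī' else none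

def underdotB (c : Char) : Option Char :=
  if c = 's' then some 'ṣ' else if c = 'n' then some 'ṇ' else if c = 't' then some 'ṭ' else none

-- Source B's _esc: the if-chain over the three (resp. five) characters right after "{\"
-- (Python reads them by one-character slices); returns (replacement, key length) on a match.
def tryEsc (s : List Char) : Option (List Char × Nat) :=
  match s with
  | a :: b :: c :: rest =>
    if a = '"' ∧ c = '}' then (umlautB b).map (fun u => ([u], 5))
    else if a = '`' ∧ c = '}' then (graveB b).map (fun u => ([u], 5))
    else if a = '\'' ∧ c = '}' then (acuteB b).map (fun u => ([u], 5))
    else if a = '=' ∧ c = '}' then (macronB b).map (fun u => ([u], 5))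
    else if a = 's' ∧ b = 's' ∧ c = '}' then some (['ß'], 5)
    else if a = 'd' ∧ b = '{' then
      match rest with
      | d :: e :: _ => if d = '}' ∧ e = '}' then (underdotB c).map (fun u => ([u], 7)) else none
      | _ => none
    else none
  | _ => none

-- Source B's _match: an escape can only start with "{\".
def tryMatch (s : List Char) : Option (List Char × Nat) :=
  match s with
  | a :: b :: rest => if a = '{' ∧ b = '\\' then tryEsc rest else none
  | _ => none

-- Source B's while loop: emit the replacement and jump past the key, or emit one char and advance.
def tscan : List Char → List Char
  | [] => []
  | c :: t =>
    match tryMatch (c :: t) with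
    | some (v, n) => v ++ tscan (t.drop (n - 1))
    | none => c :: tscan t
termination_by l => l.length
decreasing_by
  · simp only [List.length_drop, List.length_cons]; omega
  · simp

def bibtex_unescape_alt (contents : String) : String :=
  String.ofList (tscan contents.toList)

-- ===== PRECONDITION & SPEC =====
def Spec_bibtex_unescape (contents : String) (out : String) : Prop := out = bibtex_unescape_alt contents
instance (contents : String) (out : String) : Decidable (Spec_bibtex_unescape contents out) := by unfold Spec_bibtex_unescape; infer_instance

-- ===== CLAIM (what is proved, stated in full; the proofs are below) =====
def Claim_equal_bibtex_unescape : Prop := ∀ (contents : String), Dom_bibtex_unescape contents → Spec_bibtex_unescape contents (bibtex_unescape contents)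

-- ===== LEMMAS AND PROOFS =====

-- A's table over char lists (proof-side view of texTable).
def tableL : List (List Char × List Char) :=
  [(['{','\\','"','a','}'], ['ä']), (['{','\\','"','o','}'], ['ö']),
   (['{','\\','"','u','}'], ['ü']), (['{','\\','"','i','}'], ['ï']),
   (['{','\\','"','e','}'], ['ë']), (['{','\\','"','A','}'], ['Ä']),
   (['{','\\','"','O','}'], ['Ö']), (['{','\\','"','U','}'], ['Ü']),
   (['{','\\','s','s','}'], ['ß']), (['{','\\','`','e','}'], ['è']),
   (['{','\\','\'','e','}'], ['é']), (['{','\\','`','a','}'], ['à']),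
   (['{','\\','\'','a','}'], ['á']), (['{','\\','`','i','}'], ['ì']),
   (['{','\\','\'','i','}'], ['í']), (['{','\\','`','o','}'], ['ò']),
   (['{','\\','\'','o','}'], ['ó']), (['{','\\','`','u','}'], ['ù']),
   (['{','\\','\'','u','}'], ['ú']), (['{','\\','d','{','s','}','}'], ['ṣ']),
   (['{','\\','d','{','n','}','}'], ['ṇ']), (['{','\\','d','{','t','}','}'], ['ṭ']),
   (['{','\\','=','a','}'], ['ā']), (['{','\\','=','i','}'], ['ī'])]

lemma texTable_toList : texTable.map (fun kv => (kv.1.toList, kv.2.toList)) = tableL := by decide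

def rep1 (k v : List Char) : List Char → List Char
  | [] => []
  | c :: t => if k.isPrefixOf (c :: t) then v ++ rep1 k v (t.drop (k.length - 1)) else c :: rep1 k v t
termination_by l => l.length
decreasing_by
  · simp only [List.length_drop, List.length_cons]; omega
  · simp

lemma rep1_nil (k v : List Char) : rep1 k v [] = [] := by rw [rep1]

lemma rep1_match (k v r : List Char) (hk : k ≠ []) : rep1 k v (k ++ r) = v ++ rep1 k v r := by
  obtain ⟨a, as, rfl⟩ : ∃ a as, k = a :: as := by
    cases k with | nil => exact absurd rfl hk | cons a as => exact ⟨a, as, rfl⟩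
  rw [List.cons_append, rep1]
  have hp : (a :: as).isPrefixOf (a :: (as ++ r)) = true := by
    rw [List.isPrefixOf_iff_prefix]; exact ⟨r, by simp⟩
  rw [if_pos hp]
  simp

lemma rep1_no_match (k v : List Char) (c : Char) (t : List Char) (h : ¬ k <+: c :: t) :
    rep1 k v (c :: t) = c :: rep1 k v t := by
  rw [rep1, if_neg (by rw [List.isPrefixOf_iff_prefix]; exact h)]

lemma prefix_rep1 (k v : List Char) (hv : v ≠ []) (hvna : v.all (fun c => !pvDomChar c) = true) :
    ∀ t w, w.all pvDomChar = true → w <+: rep1 k v t → w <+: t := by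
  intro t
  induction t with
  | nil => intro w _ h; rwa [rep1_nil] at h
  | cons c t' ih =>
    intro w hw h
    by_cases hp : k <+: c :: t'
    · rw [rep1, if_pos (by rwa [List.isPrefixOf_iff_prefix])] at h
      match w with
      | [] => exact List.nil_prefix
      | w0 :: w' =>
        obtain ⟨v0, v', rfl⟩ : ∃ a as, v = a :: as := by
          cases v with | nil => exact absurd rfl hv | cons a as => exact ⟨a, as, rfl⟩
        obtain ⟨u, hu⟩ := h
        rw [List.cons_append, List.cons_append] at hu
        have h0 : w0 = v0 := (List.cons.injEq _ _ _ _).mp hu |>.1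
        have hx : pvDomChar w0 = true := by simp [List.all_cons] at hw; exact hw.1
        have hy : pvDomChar v0 = false := by simp [List.all_cons] at hvna; exact hvna.1
        rw [h0, hy] at hx; exact absurd hx (by simp)
    · rw [rep1_no_match _ _ _ _ hp] at h
      match w with
      | [] => exact List.nil_prefix
      | w0 :: w' =>
        rw [List.cons_prefix_cons] at h ⊢
        refine ⟨h.1, ih w' ?_ h.2⟩
        simp [List.all_cons] at hw
        exact List.all_eq_true.mpr hw.2

lemma rep1_skip (k v : List Char) :
    ∀ x r, (∀ j, j < x.length → ¬ k <+: (x ++ r).drop j) → rep1 k v (x ++ r) = x ++ rep1 k v r := by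
  intro x
  induction x with
  | nil => intro r _; simp
  | cons c x' ih =>
    intro r h
    have h0 : ¬ k <+: c :: (x' ++ r) := by simpa using h 0 (by simp)
    rw [List.cons_append, rep1_no_match _ _ _ _ h0, ih r (fun j hj => by
      simpa using h (j + 1) (by simp; omega))]
    simp

lemma tbl_keys_ne : ∀ e ∈ tableL, e.1 ≠ [] := by decide
lemma tbl_keys_ascii : ∀ e ∈ tableL, e.1.all pvDomChar = true := by decide
lemma tbl_vals_ne : ∀ e ∈ tableL, e.2 ≠ [] := by decide
lemma tbl_vals_nonascii : ∀ e ∈ tableL, e.2.all (fun c => !pvDomChar c) = true := by decide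
lemma tbl_nodup : (tableL.map (·.1)).Nodup := by decide
lemma tbl_nopref : ∀ e1 ∈ tableL, ∀ e2 ∈ tableL, e1.1 ≠ e2.1 → ¬ e1.1 <+: e2.1 := by decide
lemma tbl_ovf : ∀ e1 ∈ tableL, ∀ e2 ∈ tableL, ∀ j < e1.1.length, 0 < j →
    ¬ e1.1.drop j <+: e2.1 ∧ ¬ e2.1 <+: e1.1.drop j := by decide

-- characterisation of B's matcher against A's table --

lemma umlaut_spec (c u : Char) (h : umlautB c = some u) :
    (['{','\\','"',c,'}'], [u]) ∈ tableL := by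
  unfold umlautB at h
  split_ifs at h <;> (injection h with h; subst h; subst_vars; decide)

lemma grave_spec (c u : Char) (h : graveB c = some u) :
    (['{','\\','`',c,'}'], [u]) ∈ tableL := by
  unfold graveB at h
  split_ifs at h <;> (injection h with h; subst h; subst_vars; decide)

lemma acute_spec (c u : Char) (h : acuteB c = some u) :
    (['{','\\','\'',c,'}'], [u]) ∈ tableL := by
  unfold acuteB at h
  split_ifs at h <;> (injection h with h; subst h; subst_vars; decide)

lemma macron_spec (c u : Char) (h : macronB c = some u) :
    (['{','\\','=',c,'}'], [u]) ∈ tableL := by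
  unfold macronB at h
  split_ifs at h <;> (injection h with h; subst h; subst_vars; decide)

lemma underdot_spec (c u : Char) (h : underdotB c = some u) :
    (['{','\\','d','{',c,'}','}'], [u]) ∈ tableL := by
  unfold underdotB at h
  split_ifs at h <;> (injection h with h; subst h; subst_vars; decide)

lemma tryEsc_some (s v : List Char) (n : Nat) (h : tryEsc s = some (v, n)) :
    ∃ kv ∈ tableL, ∃ r, '{' :: '\\' :: s = kv.1 ++ r ∧ v = kv.2 ∧ n = kv.1.length := by
  unfold tryEsc at h
  split at h
  case h_1 a b c rest =>
    split_ifs at h with h1 h2 h3 h4 h5 h6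
    · obtain ⟨rfl, rfl⟩ := h1
      cases hu : umlautB b with
      | none => rw [hu] at h; cases h
      | some u =>
        rw [hu, Option.map_some] at h
        injection h with h; injection h with hv hn
        exact ⟨_, umlaut_spec b u hu, rest, rfl, hv.symm, hn.symm⟩
    · obtain ⟨rfl, rfl⟩ := h2
      cases hu : graveB b with
      | none => rw [hu] at h; cases h
      | some u =>
        rw [hu, Option.map_some] at h
        injection h with h; injection h with hv hn
        exact ⟨_, grave_spec b u hu, rest, rfl, hv.symm, hn.symm⟩
    · obtain ⟨rfl, rfl⟩ := h3
      cases hu : acuteB b with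
      | none => rw [hu] at h; cases h
      | some u =>
        rw [hu, Option.map_some] at h
        injection h with h; injection h with hv hn
        exact ⟨_, acute_spec b u hu, rest, rfl, hv.symm, hn.symm⟩
    · obtain ⟨rfl, rfl⟩ := h4
      cases hu : macronB b with
      | none => rw [hu] at h; cases h
      | some u =>
        rw [hu, Option.map_some] at h
        injection h with h; injection h with hv hn
        exact ⟨_, macron_spec b u hu, rest, rfl, hv.symm, hn.symm⟩
    · obtain ⟨rfl, rfl, rfl⟩ := h5
      injection h with h; injection h with hv hn
      exact ⟨(['{','\\','s','s','}'], ['ß']), by decide, rest, rfl, hv.symm, hn.symm⟩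
    · obtain ⟨rfl, rfl⟩ := h6
      split at h
      case h_1 d e rest' =>
        split_ifs at h with h7
        obtain ⟨rfl, rfl⟩ := h7
        cases hu : underdotB c with
        | none => rw [hu] at h; cases h
        | some u =>
          rw [hu, Option.map_some] at h
          injection h with h; injection h with hv hn
          exact ⟨_, underdot_spec c u hu, rest', rfl, hv.symm, hn.symm⟩
      case h_2 => cases h
  case h_2 => cases h

lemma tryMatch_some (l v : List Char) (n : Nat) (h : tryMatch l = some (v, n)) :
    ∃ kv ∈ tableL, ∃ r, l = kv.1 ++ r ∧ v = kv.2 ∧ n = kv.1.length := by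
  unfold tryMatch at h
  split at h
  case h_1 a b rest =>
    split_ifs at h with h1
    obtain ⟨rfl, rfl⟩ := h1
    exact tryEsc_some rest v n h
  case h_2 => cases h

lemma tryMatch_key : ∀ kv ∈ tableL, ∀ r : List Char, tryMatch (kv.1 ++ r) = some (kv.2, kv.1.length) := by
  intro kv hkv r
  fin_cases hkv <;> rfl

-- the fold of A over its table --

def rFold (es : List (List Char × List Char)) (l : List Char) : List Char :=
  es.foldl (fun c kv => rep1 kv.1 kv.2 c) l

lemma rFold_nil : ∀ es, rFold es [] = [] := by
  intro es; induction es with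
  | nil => rfl
  | cons e es ih => simp [rFold, rep1_nil] at ih ⊢; exact ih

-- no table key (other than k itself, at 0) can start anywhere inside the k-segment of k ++ r
lemma no_key_inside (k : List Char) (hk : ∃ w, (k, w) ∈ tableL) (e : List Char × List Char)
    (he : e ∈ tableL) (hne : e.1 ≠ k) (r : List Char) :
    ∀ j, j < k.length → ¬ e.1 <+: (k ++ r).drop j := by
  obtain ⟨w, hkw⟩ := hk
  intro j hj hp
  rcases Nat.eq_zero_or_pos j with hj0 | hj0
  · subst hj0
    simp only [List.drop_zero] at hp
    rcases le_total e.1.length k.length with hle | hle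
    · exact tbl_nopref e he (k, w) hkw hne
        (List.prefix_of_prefix_length_le hp (List.prefix_append k r) hle)
    · exact tbl_nopref (k, w) hkw e he (fun hx => hne (by simp [← hx]))
        (List.prefix_of_prefix_length_le (List.prefix_append k r) hp hle)
  · rw [List.drop_append_of_le_length (le_of_lt hj)] at hp
    rcases le_total e.1.length (k.drop j).length with hle | hle
    · exact (tbl_ovf (k, w) hkw e he j hj hj0).2
        (List.prefix_of_prefix_length_le hp (List.prefix_append _ r) hle)
    · exact (tbl_ovf (k, w) hkw e he j hj hj0).1
        (List.prefix_of_prefix_length_le (List.prefix_append _ r) hp hle)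

-- a pass for a table key walks through an all-non-ASCII segment unchanged
lemma rep1_na_prefix (e : List Char × List Char) (he : e ∈ tableL) (m r : List Char)
    (hm : m.all (fun c => !pvDomChar c) = true) :
    rep1 e.1 e.2 (m ++ r) = m ++ rep1 e.1 e.2 r := by
  apply rep1_skip
  intro j hj hp
  obtain ⟨k0, kt, hk⟩ : ∃ a as, e.1 = a :: as := by
    cases h : e.1 with
    | nil => exact absurd h (tbl_keys_ne e he)
    | cons a as => exact ⟨a, as, rfl⟩
  rw [List.drop_append_of_le_length (le_of_lt hj)] at hp
  obtain ⟨a, as, hd⟩ : ∃ a as, m.drop j = a :: as := by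
    cases h : m.drop j with
    | nil => exfalso; have := congrArg List.length h; simp at this; omega
    | cons a as => exact ⟨a, as, rfl⟩
  rw [hd, hk, List.cons_append, List.cons_prefix_cons] at hp
  have ha : a ∈ m := (List.drop_subset j m) (hd ▸ List.mem_cons_self)
  have h1 : pvDomChar k0 = true := by
    have := tbl_keys_ascii e he; rw [hk] at this; simp [List.all_cons] at this; exact this.1
  have h2 : pvDomChar a = false := by
    have := List.all_eq_true.mp hm a ha; simpa using this
  rw [hp.1, h2] at h1; exact absurd h1 (by simp)

lemma fold_skip_key (k : List Char) (hk : ∃ w, (k, w) ∈ tableL) :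
    ∀ es, (∀ e ∈ es, e ∈ tableL ∧ e.1 ≠ k) → ∀ r,
      rFold es (k ++ r) = k ++ rFold es r := by
  intro es
  induction es with
  | nil => intro _ r; rfl
  | cons e es ih =>
    intro h r
    have he := h e List.mem_cons_self
    simp only [rFold, List.foldl_cons]
    rw [rep1_skip e.1 e.2 k r (no_key_inside k hk e he.1 he.2 r)]
    exact ih (fun e' he' => h e' (List.mem_cons_of_mem _ he')) _

lemma fold_skip_na (m : List Char) (hm : m.all (fun c => !pvDomChar c) = true) :
    ∀ es, (∀ e ∈ es, e ∈ tableL) → ∀ r,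
      rFold es (m ++ r) = m ++ rFold es r := by
  intro es
  induction es with
  | nil => intro _ r; rfl
  | cons e es ih =>
    intro h r
    simp only [rFold, List.foldl_cons]
    rw [rep1_na_prefix e (h e List.mem_cons_self) m r hm]
    exact ih (fun e' he' => h e' (List.mem_cons_of_mem _ he')) _

def ScanInv (t₀ t : List Char) : Prop := ∀ w, w.all pvDomChar = true → w <+: t → w <+: t₀

lemma fold_cons (c : Char) (t : List Char) (hnm : ∀ e ∈ tableL, ¬ e.1 <+: c :: t) :
    ∀ es, (∀ e ∈ es, e ∈ tableL) → ∀ t', ScanInv t t' → rFold es (c :: t') = c :: rFold es t' := by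
  intro es
  induction es with
  | nil => intro _ t' _; rfl
  | cons e es ih =>
    intro h t' hinv
    have he := h e List.mem_cons_self
    have hnm' : ¬ e.1 <+: c :: t' := by
      intro hp
      obtain ⟨k0, kt, hk⟩ : ∃ a as, e.1 = a :: as := by
        cases hx : e.1 with
        | nil => exact absurd hx (tbl_keys_ne e he)
        | cons a as => exact ⟨a, as, rfl⟩
      rw [hk, List.cons_prefix_cons] at hp
      have hkt : kt.all pvDomChar = true := by
        have := tbl_keys_ascii e he; rw [hk] at this; simp [List.all_cons] at this
        exact List.all_eq_true.mpr this.2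
      have := hinv kt hkt hp.2
      exact hnm e he (by rw [hk, hp.1, List.cons_prefix_cons]; exact ⟨rfl, this⟩)
    simp only [rFold, List.foldl_cons]
    rw [rep1_no_match _ _ _ _ hnm']
    refine ih (fun e' he' => h e' (List.mem_cons_of_mem _ he')) _ ?_
    intro w hw hp
    exact hinv w hw (prefix_rep1 e.1 e.2 (tbl_vals_ne e he) (tbl_vals_nonascii e he) t' w hw hp)

lemma main_eq : ∀ fuel l, l.length ≤ fuel → l.all pvDomChar = true → rFold tableL l = tscan l := by
  intro fuel
  induction fuel with
  | zero =>
    intro l h _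
    have : l = [] := List.eq_nil_of_length_eq_zero (Nat.le_zero.mp h)
    subst this
    rw [rFold_nil, tscan]
  | succ fn ih =>
    intro l hlen hascii
    match l with
    | [] => rw [rFold_nil, tscan]
    | c :: t =>
      cases hF : tryMatch (c :: t) with
      | none =>
        have hbs : tscan (c :: t) = c :: tscan t := by rw [tscan, hF]
        have hnm : ∀ e ∈ tableL, ¬ e.1 <+: c :: t := by
          intro e he hp
          obtain ⟨r, hr⟩ := hp
          rw [← hr, tryMatch_key e he r] at hF
          cases hF
        rw [hbs, fold_cons c t hnm tableL (fun _ h => h) t (fun w _ hp => hp)]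
        congr 1
        refine ih t ?_ ?_
        · simp at hlen; omega
        · simp [List.all_cons] at hascii; exact List.all_eq_true.mpr hascii.2
      | some vn =>
        obtain ⟨v, n⟩ := vn
        obtain ⟨kv, hkmem, rest, hsplit0, hveq, hneq⟩ := tryMatch_some (c :: t) v n hF
        have hkne : kv.1 ≠ [] := tbl_keys_ne _ hkmem
        have hrest : kv.1 ++ rest = c :: t := hsplit0.symm
        have hdrop : t.drop (kv.1.length - 1) = rest := by
          obtain ⟨k0, kt, hk⟩ : ∃ a as, kv.1 = a :: as := by
            cases hx : kv.1 with
            | nil => exact absurd hx hkne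
            | cons a as => exact ⟨a, as, rfl⟩
          rw [hk] at hrest
          rw [List.cons_append] at hrest
          have ht : t = kt ++ rest := ((List.cons.injEq _ _ _ _).mp hrest |>.2).symm
          rw [hk, ht]
          simp
        have hbs : tscan (c :: t) = kv.2 ++ tscan rest := by
          rw [tscan, hF]
          show v ++ tscan (t.drop (n - 1)) = _
          rw [hveq, hneq, hdrop]
        obtain ⟨es1, es2, hes⟩ := List.append_of_mem hkmem
        have hes1T : ∀ e ∈ es1, e ∈ tableL := fun e he => hes ▸ List.mem_append_left _ he
        have hes2T : ∀ e ∈ es2, e ∈ tableL := fun e he =>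
          hes ▸ List.mem_append_right _ (List.mem_cons_of_mem _ he)
        have hes1ne : ∀ e ∈ es1, e.1 ≠ kv.1 := by
          intro e he hx
          have hnd := tbl_nodup
          rw [hes, List.map_append, List.nodup_append] at hnd
          exact hnd.2.2 e.1 (List.mem_map_of_mem he) kv.1 (by simp) hx
        have hstep : rFold tableL (c :: t) = kv.2 ++ rFold tableL rest := by
          rw [← hrest, hes]
          show rFold (es1 ++ kv :: es2) (kv.1 ++ rest) = _
          rw [rFold, List.foldl_append, List.foldl_cons]
          rw [show es1.foldl (fun c kv => rep1 kv.1 kv.2 c) (kv.1 ++ rest)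
               = rFold es1 (kv.1 ++ rest) from rfl]
          rw [fold_skip_key kv.1 ⟨kv.2, by rw [show (kv.1, kv.2) = kv from rfl]; exact hkmem⟩ es1
               (fun e he => ⟨hes1T e he, hes1ne e he⟩) rest]
          rw [rep1_match _ _ _ hkne]
          rw [show es2.foldl (fun c kv => rep1 kv.1 kv.2 c)
               (kv.2 ++ rep1 kv.1 kv.2 (rFold es1 rest))
               = rFold es2 (kv.2 ++ rep1 kv.1 kv.2 (rFold es1 rest)) from rfl]
          rw [fold_skip_na kv.2 (tbl_vals_nonascii _ hkmem) es2 hes2T]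
          simp only [rFold, List.foldl_append, List.foldl_cons]
        rw [hbs, hstep]
        congr 1
        have hkl : 0 < kv.1.length := List.length_pos_of_ne_nil hkne
        refine ih rest ?_ ?_
        · have h2 := congrArg List.length hrest
          simp only [List.length_append, List.length_cons] at h2 hlen
          omega
        · rw [← hrest] at hascii
          rw [List.all_append] at hascii
          exact (Bool.and_eq_true_iff.mp hascii).2

lemma go_eq_rep1 (k v : List Char) (hk : k ≠ []) :
    ∀ fuel l acc, l.length ≤ fuel →
      PySem.Chars.replace.go k v fuel l acc = acc.reverse ++ rep1 k v l := by
  intro fuel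
  induction fuel with
  | zero =>
    intro l acc h
    have : l = [] := List.eq_nil_of_length_eq_zero (Nat.le_zero.mp h)
    subst this
    simp [PySem.Chars.replace.go, rep1]
  | succ n ih =>
    intro l acc h
    match l with
    | [] => simp [PySem.Chars.replace.go, rep1]
    | c :: t =>
      rw [PySem.Chars.replace.go]
      by_cases hp : k.isPrefixOf (c :: t)
      · rw [if_pos hp]
        have hk1 : 0 < k.length := List.length_pos_of_ne_nil hk
        rw [ih _ _ (by
          simp only [List.length_drop, List.length_cons]
          simp only [List.length_cons] at h
          omega)]
        rw [rep1, if_pos hp]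
        obtain ⟨kh, kt, rfl⟩ : ∃ a as, k = a :: as := by
          cases k with | nil => exact absurd rfl hk | cons a as => exact ⟨a, as, rfl⟩
        simp [List.drop_succ_cons]
      · rw [if_neg hp, ih _ _ (by simp only [List.length_cons] at h; omega)]
        rw [rep1, if_neg hp]
        simp

lemma replace_eq_rep1 (k v l : List Char) (hk : k ≠ []) :
    PySem.Chars.replace l k v = rep1 k v l := by
  rw [PySem.Chars.replace, if_neg (by simp [List.isEmpty_iff, hk])]
  rw [go_eq_rep1 k v hk l.length l [] (le_refl _)]
  simp

lemma strfold : ∀ (es : List (String × String)) (s : String),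
    (es.foldl (fun c kv => PySem.Str.replace c kv.1 kv.2) s).toList
    = (es.map (fun kv => (kv.1.toList, kv.2.toList))).foldl
        (fun l kv => PySem.Chars.replace l kv.1 kv.2) s.toList := by
  intro es
  induction es with
  | nil => intro s; simp
  | cons e es ih =>
    intro s
    simp only [List.foldl_cons, List.map_cons]
    rw [ih, PySem.Str.toList_replace]

lemma chars_fold_eq_rFold : ∀ es, (∀ e ∈ es, e.1 ≠ ([] : List Char)) → ∀ l,
    es.foldl (fun c kv => PySem.Chars.replace c kv.1 kv.2) l = rFold es l := by
  intro es
  induction es with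
  | nil => intro _ l; rfl
  | cons e es ih =>
    intro h l
    simp only [List.foldl_cons, rFold]
    rw [replace_eq_rep1 e.1 e.2 l (h e List.mem_cons_self)]
    exact ih (fun e' he' => h e' (List.mem_cons_of_mem _ he')) _

-- ===== VERDICT (by name: the statement is the Claim_ definition above) =====
theorem bibtex_unescape_spec : Claim_equal_bibtex_unescape := by
  intro contents hdom
  have hdom' : contents.toList.all pvDomChar = true := hdom
  show bibtex_unescape contents = bibtex_unescape_alt contents
  rw [bibtex_unescape, bibtex_unescape_alt]
  apply String.toList_inj.mp
  rw [String.toList_ofList, strfold texTable contents, texTable_toList]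
  rw [chars_fold_eq_rFold tableL (fun e he => tbl_keys_ne e he) contents.toList]
  exact main_eq contents.toList.length contents.toList (le_refl _) hdom'
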